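-- pv_equiv track=rewrite | github.com/alexandraback/datacollection | solutions_1480487_0/Python/stephsolis/p1.py | minPos
-- ===== SOURCE A (Python) =====
-- def minPos(judgePts, X, audiencePts):
--     points = []
--     for i in range(len(judgePts)):
--         points.append(judgePts[i] + (X * audiencePts[i]))
--     pointsSrt = sorted(points)
--     minVal = pointsSrt[0]
--     out = []
--     for x in range(len(points)):
--         if points[x] == minVal:
--             out.append(x)
--     return out
-- ===== SOURCE B (Python) =====
-- def minPos(judgePts, X, audiencePts):
--     minVal = judgePts[0] + X * audiencePts[0]
--     out = []
--     for i in range(len(judgePts)):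
--         p = judgePts[i] + X * audiencePts[i]
--         if p < minVal:
--             minVal = p
--             out = [i]
--         elif p == minVal:
--             out.append(i)
--     return out
-- ===== Notes on version B (the rewrite author's own statement) =====
-- stated objective: simpler
-- what changed: B replaces A's three passes (build a points list, sort it to get the minimum, rescan for matching indices) with one pass that maintains the running minimum and its index list.
import Mathlib
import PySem

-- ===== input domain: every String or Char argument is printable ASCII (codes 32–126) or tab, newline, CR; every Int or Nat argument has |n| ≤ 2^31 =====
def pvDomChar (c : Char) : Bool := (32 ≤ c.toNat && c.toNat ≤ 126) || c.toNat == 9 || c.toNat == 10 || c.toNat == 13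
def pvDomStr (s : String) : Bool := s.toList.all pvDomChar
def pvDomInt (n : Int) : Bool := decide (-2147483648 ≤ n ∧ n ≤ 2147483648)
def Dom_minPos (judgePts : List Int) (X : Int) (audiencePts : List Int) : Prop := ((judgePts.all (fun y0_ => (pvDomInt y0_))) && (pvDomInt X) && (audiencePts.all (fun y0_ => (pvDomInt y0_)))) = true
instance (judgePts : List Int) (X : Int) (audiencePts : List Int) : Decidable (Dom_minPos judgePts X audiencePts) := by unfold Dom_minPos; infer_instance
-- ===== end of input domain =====

-- B replaces A's three passes (build list, sort for the minimum, rescan) with one pass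
-- keeping the running minimum and its index list; objective: simpler.

-- ===== PORT A =====
def minPos (judgePts : List Int) (X : Int) (audiencePts : List Int) : List Int :=
  let points := (PySem.List.pyRange 0 judgePts.length 1).foldl
    (fun pts i => pts ++ [PySem.List.pyGetD judgePts i 0 + X * PySem.List.pyGetD audiencePts i 0]) []
  let pointsSrt := PySem.List.sorted points (fun x => x) false
  let minVal := PySem.List.pyGetD pointsSrt 0 0
  (PySem.List.pyRange 0 points.length 1).foldl
    (fun out x => if PySem.List.pyGetD points x 0 = minVal then out ++ [x] else out) []

-- ===== PORT B =====
def minPos_alt (judgePts : List Int) (X : Int) (audiencePts : List Int) : List Int :=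
  let s := (PySem.List.pyRange 0 judgePts.length 1).foldl
    (fun (s : Int × List Int) i =>
      if PySem.List.pyGetD judgePts i 0 + X * PySem.List.pyGetD audiencePts i 0 < s.1 then
        (PySem.List.pyGetD judgePts i 0 + X * PySem.List.pyGetD audiencePts i 0, [i])
      else if PySem.List.pyGetD judgePts i 0 + X * PySem.List.pyGetD audiencePts i 0 = s.1 then
        (s.1, s.2 ++ [i])
      else s)
    (PySem.List.pyGetD judgePts 0 0 + X * PySem.List.pyGetD audiencePts 0 0, [])
  s.2

-- ===== PRECONDITION & SPEC =====
-- Pre_ excludes exactly the inputs where A raises IndexError: empty judgePts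
-- (pointsSrt[0]) or audiencePts shorter than judgePts (audiencePts[i]); B raises there too.
def Pre_minPos (judgePts : List Int) (X : Int) (audiencePts : List Int) : Prop :=
  judgePts ≠ [] ∧ judgePts.length ≤ audiencePts.length
instance (judgePts : List Int) (X : Int) (audiencePts : List Int) : Decidable (Pre_minPos judgePts X audiencePts) := by unfold Pre_minPos; infer_instance

def pvWitness_minPos : List Int × Int × List Int := ([3, 1, 1], 2, [0, 2, 2])

def Spec_minPos (judgePts : List Int) (X : Int) (audiencePts : List Int) (out : List Int) : Prop := out = minPos_alt judgePts X audiencePts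
instance (judgePts : List Int) (X : Int) (audiencePts : List Int) (out : List Int) : Decidable (Spec_minPos judgePts X audiencePts out) := by unfold Spec_minPos; infer_instance

-- ===== CLAIM (what is proved, stated in full; the proofs are below) =====
def Claim_equal_minPos : Prop := ∀ (judgePts : List Int) (X : Int) (audiencePts : List Int), Dom_minPos judgePts X audiencePts → Pre_minPos judgePts X audiencePts → Spec_minPos judgePts X audiencePts (minPos judgePts X audiencePts)

-- ===== LEMMAS AND PROOFS =====

-- running minimum of a fold
theorem pvFoldMin_le (f : Int → Int) : ∀ (xs : List Int) (m : Int),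
    xs.foldl (fun c i => min c (f i)) m ≤ m := by
  intro xs
  induction xs with
  | nil => intro m; simp
  | cons x xs ih =>
    intro m
    simpa using le_trans (ih (min m (f x))) (min_le_left _ _)

theorem pvFoldMin_le_mem (f : Int → Int) : ∀ (xs : List Int) (m x : Int), x ∈ xs →
    xs.foldl (fun c i => min c (f i)) m ≤ f x := by
  intro xs
  induction xs with
  | nil => intro m x hx; simp at hx
  | cons y xs ih =>
    intro m x hx
    rcases List.mem_cons.1 hx with h | h
    · subst h
      simpa using le_trans (pvFoldMin_le f xs (min m (f x))) (min_le_right _ _)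
    · simpa using ih (min m (f y)) x h

theorem pvFoldMin_mem (f : Int → Int) : ∀ (xs : List Int) (m : Int),
    xs.foldl (fun c i => min c (f i)) m = m ∨
      ∃ x ∈ xs, xs.foldl (fun c i => min c (f i)) m = f x := by
  intro xs
  induction xs with
  | nil => intro m; left; rfl
  | cons y xs ih =>
    intro m
    rcases ih (min m (f y)) with h | ⟨x, hx, h⟩
    · by_cases hmy : m ≤ f y
      · left; simpa [min_eq_left hmy] using h
      · right
        refine ⟨y, List.mem_cons_self .., ?_⟩
        simpa [min_eq_right (le_of_not_ge hmy)] using h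
    · right
      exact ⟨x, List.mem_cons_of_mem _ hx, by simpa using h⟩

-- invariant of B's single pass: the state is the running minimum together with the
-- indices (relative to the whole prefix processed so far) that attain it
theorem pvBLoop (f : Int → Int) : ∀ (xs : List Int) (m : Int) (acc : List Int),
    xs.foldl (fun (s : Int × List Int) i =>
        if f i < s.1 then (f i, [i])
        else if f i = s.1 then (s.1, s.2 ++ [i]) else s) (m, acc)
    = (xs.foldl (fun c i => min c (f i)) m,
       (if xs.foldl (fun c i => min c (f i)) m = m then acc else []) ++
         xs.filter (fun x => f x = xs.foldl (fun c i => min c (f i)) m)) := by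
  intro xs
  induction xs with
  | nil => intro m acc; simp
  | cons x xs ih =>
    intro m acc
    have hMle := pvFoldMin_le f xs
    rcases lt_trichotomy (f x) m with hlt | heq | hgt
    · have hmin : min m (f x) = f x := min_eq_right hlt.le
      have hne : xs.foldl (fun c i => min c (f i)) (f x) ≠ m := by
        have := hMle (f x); omega
      simp only [List.foldl_cons, if_pos hlt, hmin, ih, hne, if_false,
        List.filter_cons]
      by_cases hfx : f x = xs.foldl (fun c i => min c (f i)) (f x)
      · simp [← hfx]
      · have : ¬ (xs.foldl (fun c i => min c (f i)) (f x) = f x) := fun h => hfx h.symm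
        simp [hfx, this]
    · have hmin : min m (f x) = m := by omega
      simp only [List.foldl_cons, heq, if_neg (lt_irrefl m), ih, List.filter_cons]
      by_cases hM : xs.foldl (fun c i => min c (f i)) m = m
      · simp [hM]
      · have h1 : ¬ (f x = xs.foldl (fun c i => min c (f i)) m) := by
          rw [heq]; exact fun h => hM h.symm
        have h2 : ¬ (m = xs.foldl (fun c i => min c (f i)) m) := fun h => hM h.symm
        simp [hM, h2]
    · have hmin : min m (f x) = m := min_eq_left hgt.le
      have hne : ¬ (f x = xs.foldl (fun c i => min c (f i)) m) := by
        have := hMle m; intro h; omega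
      simp only [List.foldl_cons, if_neg (by omega : ¬ f x < m),
        if_neg (by omega : ¬ f x = m), hmin, ih, List.filter_cons]
      simp [hne]

theorem minPos_spec_aux (judgePts : List Int) (X : Int) (audiencePts : List Int)
    (hpre : Pre_minPos judgePts X audiencePts) :
    minPos judgePts X audiencePts = minPos_alt judgePts X audiencePts := by
  obtain ⟨hne, _⟩ := hpre
  have hn : 0 < judgePts.length := List.length_pos_of_ne_nil hne
  set n : Int := (judgePts.length : Int) with hn_def
  have hn1 : 1 ≤ n := by rw [hn_def]; exact_mod_cast hn
  set f : Int → Int := fun i =>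
    PySem.List.pyGetD judgePts i 0 + X * PySem.List.pyGetD audiencePts i 0 with hf
  set rng : List Int := PySem.List.pyRange 0 n 1 with hrng
  -- A's first loop builds points = map f rng
  have hpoints : (PySem.List.pyRange 0 judgePts.length 1).foldl
      (fun pts i => pts ++ [PySem.List.pyGetD judgePts i 0 + X * PySem.List.pyGetD audiencePts i 0]) []
      = rng.map f := by
    simpa [hrng, hf] using PySem.List.foldl_append_singleton_eq_map (l := rng) (f := f) (acc := [])
  have hlen : ((rng.map f).length : Int) = n := by
    rw [List.length_map, hrng, PySem.List.length_pyRange_one]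
    omega
  -- the head of the sorted points list
  obtain ⟨mA, t, hsort⟩ :
      ∃ mA t, PySem.List.sorted (rng.map f) (fun x => x) false = mA :: t := by
    have hl : (PySem.List.sorted (rng.map f) (fun x => x) false).length = (rng.map f).length :=
      PySem.List.length_sorted ..
    have : (rng.map f).length ≠ 0 := by
      rw [List.length_map, hrng, PySem.List.length_pyRange_one]; omega
    have hnil : PySem.List.sorted (rng.map f) (fun x => x) false ≠ [] := by
      intro h; rw [h, List.length_nil] at hl; exact this hl.symm
    obtain ⟨y, ys, h⟩ := List.exists_cons_of_ne_nil hnil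
    exact ⟨y, ys, h⟩
  have hmA_mem : mA ∈ rng.map f := by
    have : mA ∈ PySem.List.sorted (rng.map f) (fun x => x) false := by
      rw [hsort]; exact List.mem_cons_self ..
    exact (PySem.List.mem_sorted ..).1 this
  have hmA_le : ∀ y ∈ rng.map f, mA ≤ y :=
    PySem.List.key_head_sorted_le (rng.map f) (fun x => x) hsort
  -- B's running minimum
  set M : Int := rng.foldl (fun c i => min c (f i)) (f 0) with hM
  have h0mem : (0 : Int) ∈ rng := by
    rw [hrng, PySem.List.mem_pyRange_one]; omega
  have hM_le : ∀ y ∈ rng.map f, M ≤ y := by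
    intro y hy
    obtain ⟨x, hx, rfl⟩ := List.mem_map.1 hy
    exact pvFoldMin_le_mem f rng (f 0) x hx
  have hM_mem : M ∈ rng.map f := by
    rcases pvFoldMin_mem f rng (f 0) with h | ⟨x, hx, h⟩
    · rw [hM, h]; exact List.mem_map.2 ⟨0, h0mem, rfl⟩
    · rw [hM, h]; exact List.mem_map.2 ⟨x, hx, rfl⟩
  have hMA : mA = M := le_antisymm (hmA_le M hM_mem) (hM_le mA hmA_mem)
  -- evaluate both ports
  simp only [minPos, minPos_alt, hpoints]
  rw [(by rw [hlen] : ((rng.map f).length : Int) = n), ← hrng]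
  rw [hsort, PySem.List.pyGetD_zero_cons]
  rw [show (fun (s : Int × List Int) i =>
        if PySem.List.pyGetD judgePts i 0 + X * PySem.List.pyGetD audiencePts i 0 < s.1 then
          (PySem.List.pyGetD judgePts i 0 + X * PySem.List.pyGetD audiencePts i 0, [i])
        else if PySem.List.pyGetD judgePts i 0 + X * PySem.List.pyGetD audiencePts i 0 = s.1 then
          (s.1, s.2 ++ [i]) else s)
      = (fun (s : Int × List Int) i => if f i < s.1 then (f i, [i])
          else if f i = s.1 then (s.1, s.2 ++ [i]) else s) from rfl]
  rw [show PySem.List.pyGetD judgePts 0 0 + X * PySem.List.pyGetD audiencePts 0 0 = f 0 from rfl]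
  rw [pvBLoop f rng (f 0) [], ← hM]
  -- A side: turn the conditional append into a filter with predicate f x = M
  have hA : rng.foldl (fun out x =>
      if PySem.List.pyGetD (rng.map f) x 0 = mA then out ++ [x] else out) []
      = rng.filter (fun x => f x = M) := by
    have hcongr : rng.foldl (fun out x =>
        if PySem.List.pyGetD (rng.map f) x 0 = mA then out ++ [x] else out) []
        = rng.foldl (fun out x => if f x = M then out ++ [x] else out) [] := by
      refine PySem.List.foldl_congr_mem _ _ _ _ (fun acc x hx => ?_)
      have hx' := (PySem.List.mem_pyRange_one).1 (hrng ▸ hx)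
      rw [hrng] at *
      rw [PySem.List.pyGetD_map_pyRange_of_nonneg f n x 0 hx'.1 hx'.2, hMA]
    rw [hcongr]
    simpa using PySem.List.foldl_append_ite_eq_filter
      (l := rng) (p := fun x => f x = M) (acc := [])
  rw [hA]
  by_cases hM0 : M = f 0 <;> simp [hM0]

-- ===== VERDICT (by name: the statement is the Claim_ definition above) =====
theorem minPos_spec : Claim_equal_minPos := by
  intro judgePts X audiencePts _ hpre
  exact minPos_spec_aux judgePts X audiencePts hpre
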